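-- pv_equiv track=rewrite | github.com/ctlab/EvoGuess | configuration/__init__.py | to_seconds
-- ===== SOURCE A (Python) =====
-- def to_seconds(s):
--     time_scale = [1, 60, 60, 24]
--     time_units = s.split(':')[::-1]
--
--     if len(time_units) > len(time_scale):
--         time_units = time_units[:len(time_scale)]
--
--     time, acc = 0, 1
--     for i in range(len(time_units)):
--         acc *= time_scale[i]
--         time += int(time_units[i]) * acc
--
--     return time
-- ===== SOURCE B (Python) =====
-- def to_seconds(s):
--     parts = s.split(':')[-4:]
--     mults = [1] + [24, 60, 60][4 - len(parts):]
--     time = 0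
--     for m, part in zip(mults, parts):
--         time = time * m + int(part)
--     return time
-- ===== Notes on version B (the rewrite author's own statement) =====
-- stated objective: simpler
-- what changed: B drops A's reverse-and-prefix-product accumulator loop and instead evaluates the last <=4 units most-significant-first by Horner's method (time = time*mult + int(part)) over a zip with the multiplier list [1]+[24,60,60][4-len:].
import Mathlib
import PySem

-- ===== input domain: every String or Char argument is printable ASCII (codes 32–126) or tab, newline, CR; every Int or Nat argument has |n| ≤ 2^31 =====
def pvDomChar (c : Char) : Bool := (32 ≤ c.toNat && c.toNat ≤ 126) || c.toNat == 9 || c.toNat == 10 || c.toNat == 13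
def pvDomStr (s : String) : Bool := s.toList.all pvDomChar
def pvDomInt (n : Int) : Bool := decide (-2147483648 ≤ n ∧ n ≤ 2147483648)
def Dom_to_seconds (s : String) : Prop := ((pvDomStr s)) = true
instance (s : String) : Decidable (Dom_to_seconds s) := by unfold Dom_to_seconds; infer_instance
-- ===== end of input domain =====

-- B replaces A's reverse-and-prefix-product accumulation by a forward Horner evaluation
-- over the last ≤4 units (objective: simpler, same cost).

-- ===== PORT A =====
-- time_units = s.split(':')[::-1]; truncate to 4; then the indexed loop with running acc.
def to_seconds (s : String) : Int :=
  let time_scale : List Int := [1, 60, 60, 24]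
  let time_units0 := (PySem.List.slice? ((PySem.Str.split? s ":").getD []) none none (-1)).getD []
  let time_units := if time_units0.length > time_scale.length
    then PySem.List.slice time_units0 none (some (time_scale.length : Int))
    else time_units0
  ((PySem.List.pyRange 0 (time_units.length : Int) 1).foldl
    (fun (st : Int × Int) i =>
      let acc := st.2 * PySem.List.pyGetD time_scale i 0
      (st.1 + (PySem.Int.ofStr? (PySem.List.pyGetD time_units i "")).getD 0 * acc, acc))
    (0, 1)).1

-- ===== PORT B =====
-- parts = s.split(':')[-4:]; mults = [1] + [24,60,60][4-len(parts):]; Horner fold over zip.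
def to_seconds_alt (s : String) : Int :=
  let parts := PySem.List.slice ((PySem.Str.split? s ":").getD []) (some (-4)) none
  let mults : List Int := 1 :: PySem.List.slice [24, 60, 60] (some (4 - (parts.length : Int))) none
  (mults.zip parts).foldl (fun time mp => time * mp.1 + (PySem.Int.ofStr? mp.2).getD 0) 0

-- ===== PRECONDITION & SPEC =====
-- Pre_ excludes exactly the inputs where Python's int() raises ValueError on one of the
-- (at most four) units actually used, i.e. the last min(4, n) colon-separated parts.
def Pre_to_seconds (s : String) : Prop :=
  ∀ p ∈ (((PySem.Str.split? s ":").getD []).drop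
          ((((PySem.Str.split? s ":").getD []).length) - 4)),
    (PySem.Int.ofStr? p).isSome = true
instance (s : String) : Decidable (Pre_to_seconds s) := by unfold Pre_to_seconds; infer_instance
def pvWitness_to_seconds : String := "1:2:3"
def Spec_to_seconds (s : String) (out : Int) : Prop := out = to_seconds_alt s
instance (s : String) (out : Int) : Decidable (Spec_to_seconds s out) := by unfold Spec_to_seconds; infer_instance

-- ===== CLAIM (what is proved, stated in full; the proofs are below) =====
def Claim_equal_to_seconds : Prop := ∀ (s : String), Dom_to_seconds s → Pre_to_seconds s → Spec_to_seconds s (to_seconds s)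

-- ===== LEMMAS AND PROOFS =====

-- A's reversed-and-truncated unit list is the reverse of the last ≤4 parts.
lemma pv_keptA (ps : List String) :
    (if (ps.reverse).length > ([1, 60, 60, 24] : List Int).length
      then PySem.List.slice ps.reverse none (some ((([1, 60, 60, 24] : List Int).length) : Int))
      else ps.reverse)
      = (ps.drop (ps.length - 4)).reverse := by
  split_ifs with h
  · have hs := PySem.List.slice_to (α := String) (xs := ps.reverse)
      (b := (([1, 60, 60, 24] : List Int).length : Int)) (by norm_num)
    rw [hs]
    norm_num [← List.take_reverse]
    omega
  · rw [List.length_reverse, List.length_cons, List.length_cons, List.length_cons,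
      List.length_cons, List.length_nil] at h
    rw [show ps.drop (ps.length - 4) = ps from by
      have : ps.length - 4 = 0 := by omega
      simp [this]]

-- Core: on a list of at most four units, A's prefix-product accumulation equals B's Horner fold.
lemma pv_core (kept : List String) (h : kept.length ≤ 4) :
    ((PySem.List.pyRange 0 ((kept.reverse).length : Int) 1).foldl
      (fun (st : Int × Int) i =>
        let acc := st.2 * PySem.List.pyGetD ([1, 60, 60, 24] : List Int) i 0
        (st.1 + (PySem.Int.ofStr? (PySem.List.pyGetD kept.reverse i "")).getD 0 * acc, acc))
      (0, 1)).1
    = (((1 : Int) :: PySem.List.slice ([24, 60, 60] : List Int) (some (4 - (kept.length : Int))) none).zip kept).foldl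
        (fun time mp => time * mp.1 + (PySem.Int.ofStr? mp.2).getD 0) 0 := by
  match kept, h with
  | [], _ => decide
  | [a], _ =>
    simp [PySem.List.pyRange_one, List.range_succ, PySem.List.pyGetD,
      PySem.List.pyGet?, PySem.List.pyIdx?, PySem.List.slice, PySem.List.clampIdx, List.foldl]
  | [a, b], _ =>
    simp [PySem.List.pyRange_one, List.range_succ, PySem.List.pyGetD,
      PySem.List.pyGet?, PySem.List.pyIdx?, PySem.List.slice, PySem.List.clampIdx, List.foldl]
    ring
  | [a, b, c], _ =>
    simp [PySem.List.pyRange_one, List.range_succ, PySem.List.pyGetD,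
      PySem.List.pyGet?, PySem.List.pyIdx?, PySem.List.slice, PySem.List.clampIdx, List.foldl]
    ring
  | [a, b, c, d], _ =>
    simp [PySem.List.pyRange_one, List.range_succ, PySem.List.pyGetD,
      PySem.List.pyGet?, PySem.List.pyIdx?, PySem.List.slice, PySem.List.clampIdx, List.foldl]
    ring

-- ===== VERDICT (by name: the statement is the Claim_ definition above) =====
theorem to_seconds_spec : Claim_equal_to_seconds := by
  intro s _ _
  unfold Spec_to_seconds to_seconds to_seconds_alt
  simp only [PySem.List.slice?_none_none_neg_one, Option.getD_some]
  rw [pv_keptA, PySem.List.slice_from_neg_ofNat _ 4 (by norm_num)]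
  exact pv_core _ (by rw [List.length_drop]; omega)
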